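-- pv_equiv track=rewrite | github.com/parutech/ARN_Analysis | programFiles/main.py | GetSecondaryHeight
-- ===== SOURCE A (Python) =====
-- def GetSecondaryHeight(secStruct, startHeight=0):
--     heightTab = []
--     height = startHeight
--     for sym in secStruct:
--         if(sym == "("):
--             heightTab.append(height)
--             height += 1
--         elif(sym == ")"):
--             height -= 1
--             heightTab.append(height)
--         else:
--             heightTab.append(height)
--
--     return heightTab
-- ===== SOURCE B (Python) =====
-- def GetSecondaryHeight(secStruct, startHeight=0):
--     # Pass 1: map each symbol to its height delta.
--     deltas = [1 if c == "(" else (-1 if c == ")" else 0) for c in secStruct]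
--     # Pass 2: running sums give the height just before each character.
--     pres = []
--     h = startHeight
--     for d in deltas:
--         pres.append(h)
--         h += d
--     # Pass 3: emit pre-height for '(' / plain chars, post-decrement for ')'.
--     return [p + min(d, 0) for d, p in zip(deltas, pres)]
-- ===== Notes on version B (the rewrite author's own statement) =====
-- stated objective: alternative
-- what changed: Replaces the single stateful three-branch loop by a three-pass pipeline: map symbols to +1/-1/0 deltas, take running prefix sums for the pre-character heights, then emit prev + min(delta, 0) via zip.
import Mathlib
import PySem

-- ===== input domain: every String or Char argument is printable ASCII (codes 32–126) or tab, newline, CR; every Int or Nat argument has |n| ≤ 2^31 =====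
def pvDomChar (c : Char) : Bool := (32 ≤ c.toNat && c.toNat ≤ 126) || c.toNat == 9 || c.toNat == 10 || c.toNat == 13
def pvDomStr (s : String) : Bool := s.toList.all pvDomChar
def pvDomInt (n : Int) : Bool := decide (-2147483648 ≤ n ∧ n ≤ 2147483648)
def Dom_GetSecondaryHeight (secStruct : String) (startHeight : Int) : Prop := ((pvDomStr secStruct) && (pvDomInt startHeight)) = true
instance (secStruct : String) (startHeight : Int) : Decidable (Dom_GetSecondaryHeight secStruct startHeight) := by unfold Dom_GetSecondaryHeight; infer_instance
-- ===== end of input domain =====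

-- B replaces A's single stateful three-branch loop by a delta-map / prefix-sum / zip pipeline (same O(n) cost).


-- ===== PORT A =====
-- state = (heightTab, height); branches in A's order
def pvAStep (st : List Int × Int) (sym : Char) : List Int × Int :=
  if sym = '(' then (st.1 ++ [st.2], st.2 + 1)
  else if sym = ')' then (st.1 ++ [st.2 - 1], st.2 - 1)
  else (st.1 ++ [st.2], st.2)

def GetSecondaryHeight (secStruct : String) (startHeight : Int) : List Int :=
  (secStruct.toList.foldl pvAStep ([], startHeight)).1

-- ===== PORT B =====
def pvDelta (c : Char) : Int := if c = '(' then 1 else if c = ')' then -1 else 0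

-- pass 2: running prefix sums (the pre-character heights)
def pvPres (ds : List Int) (h : Int) : List Int :=
  match ds with
  | [] => []
  | d :: ds => h :: pvPres ds (h + d)

def GetSecondaryHeight_alt (secStruct : String) (startHeight : Int) : List Int :=
  let deltas := secStruct.toList.map pvDelta
  (deltas.zip (pvPres deltas startHeight)).map (fun dp => dp.2 + min dp.1 0)

-- ===== PRECONDITION & SPEC =====
def Spec_GetSecondaryHeight (secStruct : String) (startHeight : Int) (out : List Int) : Prop := out = GetSecondaryHeight_alt secStruct startHeight
instance (secStruct : String) (startHeight : Int) (out : List Int) : Decidable (Spec_GetSecondaryHeight secStruct startHeight out) := by unfold Spec_GetSecondaryHeight; infer_instance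

-- ===== CLAIM (what is proved, stated in full; the proofs are below) =====
def Claim_equal_GetSecondaryHeight : Prop := ∀ (secStruct : String) (startHeight : Int), Dom_GetSecondaryHeight secStruct startHeight → Spec_GetSecondaryHeight secStruct startHeight (GetSecondaryHeight secStruct startHeight)

-- ===== LEMMAS AND PROOFS =====
theorem pvMain (cs : List Char) (acc : List Int) (h : Int) :
    (cs.foldl pvAStep (acc, h)).1 =
      acc ++ ((cs.map pvDelta).zip (pvPres (cs.map pvDelta) h)).map (fun dp => dp.2 + min dp.1 0) := by
  induction cs generalizing acc h with
  | nil => simp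
  | cons c cs ih =>
    simp only [List.foldl_cons, List.map_cons, pvPres, List.zip_cons_cons, List.map_cons, pvAStep]
    by_cases h1 : c = '('
    · simp [h1, pvDelta, ih]
    · by_cases h2 : c = ')'
      · simp [h1, h2, pvDelta, ih, sub_eq_add_neg]
      · simp [h1, h2, pvDelta, ih, sub_eq_add_neg]

-- ===== VERDICT (by name: the statement is the Claim_ definition above) =====
theorem GetSecondaryHeight_spec : Claim_equal_GetSecondaryHeight := by
  intro s h _
  show _ = _
  simpa [GetSecondaryHeight, GetSecondaryHeight_alt] using pvMain s.toList [] h
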